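-- pv_equiv track=rewrite | github.com/hyzcn/VQD | VQD_dataset_creation/create_vqd_json.py | question_tokenize
-- ===== SOURCE A (Python) =====
-- def question_tokenize(questions_bbox):
--     """
--     Map unique question to index and index to question
--     :param questions_bbox: List of question bounding box annotations
--     :return: A tuple containing tokenize question
--     """
--     question2idx = dict()
--     idx2question = []
--
--     index = 0
--     for ques_bbox_dict in questions_bbox:
--         for ques, bbox_ques_type in ques_bbox_dict.items():
--             ques_type = bbox_ques_type[1]
--
--             if ques not in question2idx:
--                 # Unique question gets a unique index
--                 question2idx[ques] = str(index)
--
--                 # Each list index saves a dictionary of question,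
--                 # question_id, and question_type
--                 idx2question.append({
--                     'question': ques,
--                     'question_id': str(index),
--                     'question_type': ques_type
--                 })
--                 index += 1
--     return question2idx, idx2question
-- ===== SOURCE B (Python) =====
-- def question_tokenize(questions_bbox):
--     """
--     Map unique question to index and index to question
--     :param questions_bbox: List of question bounding box annotations
--     :return: A tuple containing tokenize question
--     """
--     # Phase 1: order-preserving dedup, keeping the first-seen question_type.
--     unique = {}
--     for ques_bbox_dict in questions_bbox:
--         for ques, bbox_ques_type in ques_bbox_dict.items():
--             unique.setdefault(ques, bbox_ques_type[1])
--
--     # Phase 2: project the dedup table into both outputs at once.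
--     question2idx = {}
--     idx2question = []
--     for index, (ques, ques_type) in enumerate(unique.items()):
--         question2idx[ques] = str(index)
--         idx2question.append({
--             'question': ques,
--             'question_id': str(index),
--             'question_type': ques_type
--         })
--     return question2idx, idx2question
-- ===== Notes on version B (the rewrite author's own statement) =====
-- stated objective: simpler
-- what changed: A's single interleaved loop that tests membership, appends to both outputs and maintains a manual index counter is replaced by two distinct phases: an order-preserving dedup table built with dict.setdefault (keeping the first-seen question_type), then one enumerate pass over that table that projects out question2idx and idx2question together.
import Mathlib
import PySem

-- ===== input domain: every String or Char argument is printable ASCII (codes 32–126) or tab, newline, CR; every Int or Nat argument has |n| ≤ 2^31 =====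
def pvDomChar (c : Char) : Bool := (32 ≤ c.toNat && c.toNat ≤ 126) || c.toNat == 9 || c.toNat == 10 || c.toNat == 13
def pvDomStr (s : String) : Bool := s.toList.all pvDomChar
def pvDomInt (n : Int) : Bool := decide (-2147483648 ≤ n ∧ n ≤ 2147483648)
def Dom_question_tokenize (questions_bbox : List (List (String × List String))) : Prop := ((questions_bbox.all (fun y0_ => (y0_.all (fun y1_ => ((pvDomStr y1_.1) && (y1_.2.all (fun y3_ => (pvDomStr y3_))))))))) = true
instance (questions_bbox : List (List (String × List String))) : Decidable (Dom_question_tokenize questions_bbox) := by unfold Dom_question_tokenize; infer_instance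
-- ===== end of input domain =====

-- B replaces A's single interleaved loop (dedup + build both outputs + manual counter) by a
-- dedup phase (setdefault) followed by an enumerate projection phase — objective: simpler.

-- ===== PORT A =====
-- state = (question2idx, idx2question, index)
def question_tokenize (questions_bbox : List (List (String × List String))) :
    (List (String × String)) × (List (List (String × String))) :=
  let st := questions_bbox.foldl
    (fun (st : PySem.Dict String String × List (List (String × String)) × Int) ques_bbox_dict =>
      ((PySem.Dict.ofList ques_bbox_dict).items).foldl
        (fun st p =>
          let ques := p.1
          -- bbox_ques_type[1]: Pre_ keeps the index in range (Python raises IndexError otherwise)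
          let ques_type := PySem.List.pyGetD p.2 1 ""
          if st.1.contains ques then st
          else (st.1.insert ques (PySem.Int.toStr st.2.2),
                st.2.1 ++ [[("question", ques), ("question_id", PySem.Int.toStr st.2.2),
                            ("question_type", ques_type)]],
                st.2.2 + 1))
        st)
    (PySem.Dict.empty, [], 0)
  (st.1.items, st.2.1)

-- ===== PORT B =====
def question_tokenize_alt (questions_bbox : List (List (String × List String))) :
    (List (String × String)) × (List (List (String × String))) :=
  -- phase 1: order-preserving dedup keeping the first-seen type
  let unique : PySem.Dict String String := questions_bbox.foldl
    (fun u ques_bbox_dict =>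
      ((PySem.Dict.ofList ques_bbox_dict).items).foldl
        -- bbox_ques_type[1]: Pre_ keeps the index in range (Python raises IndexError otherwise)
        (fun u p => u.setdefault p.1 (PySem.List.pyGetD p.2 1 "")) u)
    PySem.Dict.empty
  -- phase 2: project the dedup table into both outputs at once
  let st := (PySem.List.enumerate unique.items).foldl
    (fun (st : PySem.Dict String String × List (List (String × String))) ip =>
      (st.1.insert ip.2.1 (PySem.Int.toStr ip.1),
       st.2 ++ [[("question", ip.2.1), ("question_id", PySem.Int.toStr ip.1),
                 ("question_type", ip.2.2)]]))
    (PySem.Dict.empty, [])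
  (st.1.items, st.2)

-- ===== PRECONDITION & SPEC =====
-- Pre_ excludes exactly the inputs on which Python A raises IndexError: a dict value
-- (after Python's duplicate-key overwrite, hence Dict.ofList) with fewer than 2 elements.
def Pre_question_tokenize (questions_bbox : List (List (String × List String))) : Prop :=
  ∀ d ∈ questions_bbox, ∀ p ∈ (PySem.Dict.ofList d).items, 2 ≤ p.2.length
instance (questions_bbox : List (List (String × List String))) : Decidable (Pre_question_tokenize questions_bbox) := by unfold Pre_question_tokenize; infer_instance
def pvWitness_question_tokenize : (List (List (String × List String))) :=
  [[("how many dogs", ["0 3 5 7", "counting"]), ("what color", ["1 2 3 4", "color"])],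
   [("how many dogs", ["2 2 2 2", "counting"])]]

def Spec_question_tokenize (questions_bbox : List (List (String × List String))) (out : (List (String × String)) × (List (List (String × String)))) : Prop := out = question_tokenize_alt questions_bbox
instance (questions_bbox : List (List (String × List String))) (out : (List (String × String)) × (List (List (String × String)))) : Decidable (Spec_question_tokenize questions_bbox out) := by unfold Spec_question_tokenize; infer_instance

-- ===== CLAIM (what is proved, stated in full; the proofs are below) =====
def Claim_equal_question_tokenize : Prop := ∀ (questions_bbox : List (List (String × List String))), Dom_question_tokenize questions_bbox → Pre_question_tokenize questions_bbox → Spec_question_tokenize questions_bbox (question_tokenize questions_bbox)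

-- ===== LEMMAS AND PROOFS =====

-- the flattened pair stream both programs traverse
def pvPairs (questions_bbox : List (List (String × List String))) : List (String × List String) :=
  questions_bbox.flatMap (fun d => (PySem.Dict.ofList d).items)

-- B's phase-1 step
def pvStepU (u : PySem.Dict String String) (p : String × List String) : PySem.Dict String String :=
  u.setdefault p.1 (PySem.List.pyGetD p.2 1 "")

-- what A's question2idx looks like in terms of the dedup table
def pvQ2I (u : PySem.Dict String String) : List (String × String) :=
  (PySem.List.enumerate u.items).map (fun ip => (ip.2.1, PySem.Int.toStr ip.1))

-- what A's idx2question looks like in terms of the dedup table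
def pvI2Q (u : PySem.Dict String String) : List (List (String × String)) :=
  (PySem.List.enumerate u.items).map (fun ip =>
    [("question", ip.2.1), ("question_id", PySem.Int.toStr ip.1), ("question_type", ip.2.2)])

lemma map_snd_fst_enumerate {A B : Type} (l : List (A × B)) (s : Int) :
    (PySem.List.enumerate l s).map (fun ip => ip.2.1) = l.map Prod.fst := by
  induction l generalizing s with
  | nil => rfl
  | cons x xs ih => simp [PySem.List.enumerate_cons, ih]

lemma pvQ2I_keys (u : PySem.Dict String String) :
    (pvQ2I u).map Prod.fst = u.keys := by
  have h : (pvQ2I u).map Prod.fst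
      = (PySem.List.enumerate u.items).map (fun ip => ip.2.1) := by
    simp [pvQ2I, List.map_map, Function.comp_def]
  rw [h, map_snd_fst_enumerate]
  rfl

-- A's loop body, named for the proofs (the port itself keeps the inline lambda)
def pvStepA (st : PySem.Dict String String × List (List (String × String)) × Int)
    (p : String × List String) :
    PySem.Dict String String × List (List (String × String)) × Int :=
  let ques := p.1
  let ques_type := PySem.List.pyGetD p.2 1 ""
  if st.1.contains ques then st
  else (st.1.insert ques (PySem.Int.toStr st.2.2),
        st.2.1 ++ [[("question", ques), ("question_id", PySem.Int.toStr st.2.2),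
                    ("question_type", ques_type)]],
        st.2.2 + 1)

lemma pvContains (u : PySem.Dict String String) (q : String) :
    (PySem.Dict.mk (pvQ2I u)).contains q = u.contains q := by
  rw [PySem.Dict.contains_eq_decide_mem_keys, PySem.Dict.contains_eq_decide_mem_keys]
  have h : (PySem.Dict.mk (pvQ2I u)).keys = u.keys := pvQ2I_keys u
  rw [h]

lemma pvQ2I_insert (u : PySem.Dict String String) (q v : String)
    (h : u.contains q = false) :
    pvQ2I (u.insert q v) = pvQ2I u ++ [(q, PySem.Int.toStr (u.size : Int))] := by
  unfold pvQ2I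
  rw [PySem.Dict.items_insert_of_not_contains _ _ h, PySem.List.enumerate_append]
  simp [PySem.List.enumerate_cons, PySem.List.enumerate_nil, PySem.Dict.size]

lemma pvI2Q_insert (u : PySem.Dict String String) (q v : String)
    (h : u.contains q = false) :
    pvI2Q (u.insert q v) = pvI2Q u ++
      [[("question", q), ("question_id", PySem.Int.toStr (u.size : Int)),
        ("question_type", v)]] := by
  unfold pvI2Q
  rw [PySem.Dict.items_insert_of_not_contains _ _ h, PySem.List.enumerate_append]
  simp [PySem.List.enumerate_cons, PySem.List.enumerate_nil, PySem.Dict.size]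

-- the invariant: A's interleaved loop, run from the state B would project out of a
-- dedup table u, lands on the state projected out of the updated dedup table
lemma pvInv (ps : List (String × List String)) :
    ∀ u : PySem.Dict String String, u.keys.Nodup →
    ps.foldl pvStepA (PySem.Dict.mk (pvQ2I u), pvI2Q u, (u.size : Int)) =
    (PySem.Dict.mk (pvQ2I (ps.foldl pvStepU u)), pvI2Q (ps.foldl pvStepU u),
      ((ps.foldl pvStepU u).size : Int)) := by
  induction ps with
  | nil => intro u _; rfl
  | cons p ps ih =>
    intro u hnd
    rw [List.foldl_cons, List.foldl_cons]
    by_cases h : u.contains p.1 = true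
    · have hA : pvStepA (PySem.Dict.mk (pvQ2I u), pvI2Q u, (u.size : Int)) p
          = (PySem.Dict.mk (pvQ2I u), pvI2Q u, (u.size : Int)) := by
        have hc : (PySem.Dict.mk (pvQ2I u)).contains p.1 = true := by
          rw [pvContains]; exact h
        simp only [pvStepA, hc, if_true]
      have hU : pvStepU u p = u := PySem.Dict.setdefault_of_contains u _ h
      rw [hA, hU]
      exact ih u hnd
    · have hf : u.contains p.1 = false := by
        cases hc : u.contains p.1 with
        | true => exact absurd hc h
        | false => rfl
      have hmkf : (PySem.Dict.mk (pvQ2I u)).contains p.1 = false := by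
        rw [pvContains]; exact hf
      have hU : pvStepU u p = u.insert p.1 (PySem.List.pyGetD p.2 1 "") :=
        PySem.Dict.setdefault_of_not_contains u _ hf
      set v := PySem.List.pyGetD p.2 1 "" with hv
      have hA : pvStepA (PySem.Dict.mk (pvQ2I u), pvI2Q u, (u.size : Int)) p
          = (PySem.Dict.mk (pvQ2I (u.insert p.1 v)), pvI2Q (u.insert p.1 v),
              ((u.insert p.1 v).size : Int)) := by
        simp only [pvStepA, hmkf, Bool.false_eq_true, if_false]
        refine congrArg₂ Prod.mk ?_ (congrArg₂ Prod.mk ?_ ?_)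
        · apply PySem.Dict.ext
          rw [PySem.Dict.items_insert_of_not_contains _ _ hmkf]
          show pvQ2I u ++ [(p.1, PySem.Int.toStr (u.size : Int))] = pvQ2I (u.insert p.1 v)
          rw [pvQ2I_insert u p.1 v hf]
        · rw [pvI2Q_insert u p.1 v hf]
        · rw [PySem.Dict.size_insert]
          simp [hf]
      rw [hA, hU]
      exact ih _ (PySem.Dict.nodup_keys_insert u p.1 v hnd)

lemma pvNodupFold (ps : List (String × List String)) :
    ∀ u : PySem.Dict String String, u.keys.Nodup → (ps.foldl pvStepU u).keys.Nodup := by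
  induction ps with
  | nil => intro u h; exact h
  | cons p ps ih =>
    intro u hnd
    rw [List.foldl_cons]
    cases hc : u.contains p.1 with
    | true =>
      rw [show pvStepU u p = u from PySem.Dict.setdefault_of_contains u _ hc]
      exact ih u hnd
    | false =>
      rw [show pvStepU u p = u.insert p.1 (PySem.List.pyGetD p.2 1 "") from
        PySem.Dict.setdefault_of_not_contains u _ hc]
      exact ih _ (PySem.Dict.nodup_keys_insert u _ _ hnd)

lemma pvA_eq (qb : List (List (String × List String))) :
    question_tokenize qb =
      (pvQ2I ((pvPairs qb).foldl pvStepU PySem.Dict.empty),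
       pvI2Q ((pvPairs qb).foldl pvStepU PySem.Dict.empty)) := by
  have key : qb.foldl (fun st d => ((PySem.Dict.ofList d).items).foldl pvStepA st)
        (PySem.Dict.empty, ([] : List (List (String × String))), (0 : Int))
      = (PySem.Dict.mk (pvQ2I ((pvPairs qb).foldl pvStepU PySem.Dict.empty)),
         pvI2Q ((pvPairs qb).foldl pvStepU PySem.Dict.empty),
         (((pvPairs qb).foldl pvStepU PySem.Dict.empty).size : Int)) := by
    rw [← List.foldl_flatMap]
    exact pvInv (pvPairs qb) PySem.Dict.empty (by decide)
  exact congrArg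
    (fun st : PySem.Dict String String × List (List (String × String)) × Int =>
      (st.1.items, st.2.1)) key

lemma pvB_eq (qb : List (List (String × List String))) :
    question_tokenize_alt qb =
      (pvQ2I ((pvPairs qb).foldl pvStepU PySem.Dict.empty),
       pvI2Q ((pvPairs qb).foldl pvStepU PySem.Dict.empty)) := by
  set U := (pvPairs qb).foldl pvStepU PySem.Dict.empty with hU
  have hnd : U.keys.Nodup := pvNodupFold _ _ (by decide)
  have key1 : qb.foldl
      (fun u ques_bbox_dict => ((PySem.Dict.ofList ques_bbox_dict).items).foldl
        (fun u p => u.setdefault p.1 (PySem.List.pyGetD p.2 1 "")) u)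
      PySem.Dict.empty = U := (List.foldl_flatMap).symm
  have key2 : (PySem.List.enumerate U.items).foldl
      (fun (st : PySem.Dict String String × List (List (String × String))) ip =>
        (st.1.insert ip.2.1 (PySem.Int.toStr ip.1),
         st.2 ++ [[("question", ip.2.1), ("question_id", PySem.Int.toStr ip.1),
                   ("question_type", ip.2.2)]]))
      (PySem.Dict.empty, []) = (PySem.Dict.mk (pvQ2I U), pvI2Q U) := by
    rw [PySem.List.foldl_prod_mk
          (f := fun (d : PySem.Dict String String) (ip : Int × (String × String)) =>
            d.insert ip.2.1 (PySem.Int.toStr ip.1))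
          (g := fun (l : List (List (String × String))) (ip : Int × (String × String)) =>
            l ++ [[("question", ip.2.1), ("question_id", PySem.Int.toStr ip.1),
                   ("question_type", ip.2.2)]])]
    refine congrArg₂ Prod.mk ?_ ?_
    · apply PySem.Dict.ext
      rw [PySem.Dict.items_foldl_insert_fresh _ _ _ _
            (fun a _ => rfl)
            (by rw [map_snd_fst_enumerate]; exact hnd)]
      rfl
    · rw [PySem.List.foldl_append_singleton_eq_map]
      rfl
  show (let unique := qb.foldl
          (fun u ques_bbox_dict => ((PySem.Dict.ofList ques_bbox_dict).items).foldl
            (fun u p => u.setdefault p.1 (PySem.List.pyGetD p.2 1 "")) u)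
          PySem.Dict.empty
        let st := (PySem.List.enumerate unique.items).foldl
          (fun (st : PySem.Dict String String × List (List (String × String))) ip =>
            (st.1.insert ip.2.1 (PySem.Int.toStr ip.1),
             st.2 ++ [[("question", ip.2.1), ("question_id", PySem.Int.toStr ip.1),
                       ("question_type", ip.2.2)]]))
          (PySem.Dict.empty, [])
        (st.1.items, st.2)) = (pvQ2I U, pvI2Q U)
  simp only [key1, key2]

theorem question_tokenize_spec : Claim_equal_question_tokenize := by
  intro qb _ _
  show question_tokenize qb = question_tokenize_alt qb
  rw [pvA_eq, pvB_eq]
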